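-- pv_equiv track=rewrite | github.com/mlockwood/bioinformatics | dna_messaging/deamination.py | find_max_skews
-- ===== SOURCE A (Python) =====
-- def find_max_skews(genome):
--     """
--     Find the maximum skew indices of a genome.
--     :param genome: genome string
--     :return: space delimited string of maximum skews
--     """
--     prev = 0
--     cur_max = 0
--     max_skews = []
--     i = 0
--     while i < len(genome):
--         prev += 1 if genome[i] == 'G' else (-1 if genome[i] == 'C' else 0)
--         if prev > cur_max:
--             cur_max = prev
--             max_skews = [i+1]
--         elif prev == cur_max:
--             max_skews.append(i+1)
--         i += 1
--     return ' '.join(str(i) for i in max_skews)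
-- ===== SOURCE B (Python) =====
-- def find_max_skews(genome):
--     """
--     Find the maximum skew indices of a genome.
--     :param genome: genome string
--     :return: space delimited string of maximum skews
--     """
--     # Pass 1: running G-C skew table.
--     skews = []
--     s = 0
--     for c in genome:
--         s += (c == 'G') - (c == 'C')
--         skews.append(s)
--     # Pass 2: the maximum (floored at 0, as an empty prefix has skew 0), then filter.
--     m = max(0, max(skews, default=0))
--     return ' '.join(str(i + 1) for i, v in enumerate(skews) if v == m)
-- ===== Notes on version B (the rewrite author's own statement) =====
-- stated objective: alternative
-- what changed: Replaces A's single fused loop that incrementally maintains the running max and resets/extends the index list with a table-then-reduce decomposition: build the full running-skew list in one pass, take m = max(0, max(skews)), then collect the matching indices in a second pass.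
import Mathlib
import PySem

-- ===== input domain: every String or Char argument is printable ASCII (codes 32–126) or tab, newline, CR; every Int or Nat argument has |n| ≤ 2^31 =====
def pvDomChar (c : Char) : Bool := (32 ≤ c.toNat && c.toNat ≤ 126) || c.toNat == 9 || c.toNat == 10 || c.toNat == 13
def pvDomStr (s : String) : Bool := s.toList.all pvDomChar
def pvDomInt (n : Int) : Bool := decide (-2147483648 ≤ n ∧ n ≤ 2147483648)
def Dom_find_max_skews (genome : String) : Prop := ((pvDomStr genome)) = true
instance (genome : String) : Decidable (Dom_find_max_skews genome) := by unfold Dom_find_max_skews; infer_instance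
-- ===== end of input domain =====

-- B builds the skew table first and then does a max/filter reduction, instead of A's
-- fused incremental loop; same cost, different decomposition (objective: alternative).

-- ===== PORT A =====
-- A's while loop over i, maintaining (prev, cur_max, max_skews).
def find_max_skews (genome : String) : String :=
  let st := (PySem.List.enumerate genome.toList).foldl
    (fun (st : Int × Int × List Int) p =>
      let prev := st.1 + (if p.2 = 'G' then (1 : Int) else if p.2 = 'C' then -1 else 0)
      if prev > st.2.1 then (prev, prev, [p.1 + 1])
      else if prev = st.2.1 then (prev, st.2.1, st.2.2 ++ [p.1 + 1])
      else (prev, st.2.1, st.2.2)) (0, 0, ([] : List Int))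
  PySem.Str.join " " (st.2.2.map (fun i => PySem.Int.toStr i))

-- ===== PORT B =====
-- pass 1: running-skew table; pass 2: m = max(0, max(skews, default=0)); filter+join.
def find_max_skews_alt (genome : String) : String :=
  let r := genome.toList.foldl
    (fun (st : Int × List Int) c =>
      let s := st.1 + ((if c = 'G' then (1 : Int) else 0) - (if c = 'C' then (1 : Int) else 0))
      (s, st.2 ++ [s])) ((0 : Int), ([] : List Int))
  let m := max (0 : Int) ((PySem.List.max? r.2 (fun v => v)).getD 0)
  PySem.Str.join " "
    (((PySem.List.enumerate r.2).filter (fun p => p.2 == m)).map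
      (fun p => PySem.Int.toStr (p.1 + 1)))

-- ===== PRECONDITION & SPEC =====
def Spec_find_max_skews (genome : String) (out : String) : Prop := out = find_max_skews_alt genome
instance (genome : String) (out : String) : Decidable (Spec_find_max_skews genome out) := by unfold Spec_find_max_skews; infer_instance

-- ===== CLAIM (what is proved, stated in full; the proofs are below) =====
def Claim_equal_find_max_skews : Prop := ∀ (genome : String), Dom_find_max_skews genome → Spec_find_max_skews genome (find_max_skews genome)

-- ===== LEMMAS AND PROOFS =====

-- the per-character skew delta
def pvD (c : Char) : Int := if c = 'G' then 1 else if c = 'C' then -1 else 0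

-- running-skew table starting from accumulated value a
def pvSk (a : Int) : List Char → List Int
  | [] => []
  | c :: l => (a + pvD c) :: pvSk (a + pvD c) l

-- floored running max (value of max(0, max(xs, default=0)))
def pvMv (xs : List Int) : Int := xs.foldl max 0

lemma pvD_eq (c : Char) :
    (if c = 'G' then (1 : Int) else 0) - (if c = 'C' then (1 : Int) else 0) = pvD c := by
  unfold pvD
  by_cases h : c = 'G' <;> by_cases h' : c = 'C' <;> simp_all

lemma pvSk_append (a : Int) (l l' : List Char) :
    pvSk a (l ++ l') = pvSk a l ++ pvSk (a + (l.map pvD).sum) l' := by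
  induction l generalizing a with
  | nil => simp [pvSk]
  | cons c t ih => simp [pvSk, ih (a + pvD c), add_assoc]

lemma foldl_max_max (t : List Int) (a b : Int) :
    t.foldl max (max a b) = max a (t.foldl max b) := by
  induction t generalizing b with
  | nil => rfl
  | cons c t ih => simpa [List.foldl, max_assoc] using ih (max b c)

lemma pvMv_eq_max? (xs : List Int) :
    pvMv xs = max 0 ((PySem.List.max? xs (fun v => v)).getD 0) := by
  cases xs with
  | nil => rfl
  | cons x t =>
      rw [PySem.List.max?_id_cons]
      simpa [pvMv, List.foldl] using foldl_max_max t 0 x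

lemma pvMv_append_singleton (xs : List Int) (s : Int) :
    pvMv (xs ++ [s]) = max (pvMv xs) s := by
  simp [pvMv, List.foldl_append]

lemma mem_le_pvMv (xs : List Int) (x : Int) (hx : x ∈ xs) : x ≤ pvMv xs :=
  (PySem.List.le_foldl_max xs 0).2 x hx

-- B's table-building loop computes (running sum, skew table)
lemma foldB'_eq (l : List Char) (a : Int) (acc : List Int) :
    l.foldl (fun (st : Int × List Int) c => (st.1 + pvD c, st.2 ++ [st.1 + pvD c])) (a, acc)
      = (a + (l.map pvD).sum, acc ++ pvSk a l) := by
  induction l generalizing a acc with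
  | nil => simp [pvSk]
  | cons c t ih => simp [ih, pvSk, add_assoc]

lemma foldB_eq (l : List Char) (a : Int) (acc : List Int) :
    l.foldl (fun (st : Int × List Int) c =>
        let s := st.1 + ((if c = 'G' then (1 : Int) else 0) - (if c = 'C' then (1 : Int) else 0))
        (s, st.2 ++ [s])) (a, acc)
      = (a + (l.map pvD).sum, acc ++ pvSk a l) := by
  have hf : (fun (st : Int × List Int) c =>
        let s := st.1 + ((if c = 'G' then (1 : Int) else 0) - (if c = 'C' then (1 : Int) else 0))
        (s, st.2 ++ [s]))
      = (fun (st : Int × List Int) c => (st.1 + pvD c, st.2 ++ [st.1 + pvD c])) := by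
    funext st c
    simp [pvD_eq]
  rw [hf, foldB'_eq]

lemma pvSk_length (a : Int) (u : List Char) : (pvSk a u).length = u.length := by
  induction u generalizing a with
  | nil => rfl
  | cons e v ihv => simp [pvSk, ihv]

-- the index list of A, characterised via B's filter
def pvJ (xs : List Int) (m : Int) : List Int :=
  ((PySem.List.enumerate xs).filter (fun p => p.2 == m)).map (fun p => p.1 + 1)

lemma pvJ_append_singleton (xs : List Int) (s m : Int) :
    pvJ (xs ++ [s]) m = pvJ xs m ++ (if s == m then [(xs.length : Int) + 1] else []) := by
  unfold pvJ
  rw [PySem.List.enumerate_append]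
  by_cases h : s = m <;>
    simp [PySem.List.enumerate, List.filter_append, h]

lemma pvJ_all_lt (xs : List Int) (m : Int) (h : ∀ x ∈ xs, x < m) : pvJ xs m = [] := by
  unfold pvJ
  have : (PySem.List.enumerate xs).filter (fun p => p.2 == m) = [] := by
    apply List.filter_eq_nil_iff.mpr
    intro p hp
    rcases (PySem.List.mem_enumerate_iff _ _ _).1 hp with ⟨k, hk, rfl⟩
    have := h _ (List.getElem_mem hk)
    simp
    omega
  simp [this]

-- A's loop invariant: state after the whole input = (sum, floored max, matching indices)
lemma foldA_eq (l : List Char) :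
    (PySem.List.enumerate l).foldl
      (fun (st : Int × Int × List Int) p =>
        let prev := st.1 + (if p.2 = 'G' then (1 : Int) else if p.2 = 'C' then -1 else 0)
        if prev > st.2.1 then (prev, prev, [p.1 + 1])
        else if prev = st.2.1 then (prev, st.2.1, st.2.2 ++ [p.1 + 1])
        else (prev, st.2.1, st.2.2)) (0, 0, ([] : List Int))
      = ((l.map pvD).sum, pvMv (pvSk 0 l), pvJ (pvSk 0 l) (pvMv (pvSk 0 l))) := by
  induction l using List.reverseRecOn with
  | nil => simp [pvSk, pvMv, pvJ, PySem.List.enumerate]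
  | append_singleton t c ih =>
      rw [PySem.List.enumerate_append, List.foldl_append, ih]
      have hsk : pvSk 0 (t ++ [c]) = pvSk 0 t ++ [(t.map pvD).sum + pvD c] := by
        simpa [pvSk] using pvSk_append 0 t [c]
      have hsum : ((t ++ [c]).map pvD).sum = (t.map pvD).sum + pvD c := by simp
      set s := (t.map pvD).sum + pvD c with hs
      set M := pvMv (pvSk 0 t) with hM
      have hstep : (t.map pvD).sum + (if c = 'G' then (1 : Int) else if c = 'C' then -1 else 0) = s := by
        simp [hs, pvD]
      rw [hsk, hsum, pvMv_append_singleton]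
      simp only [PySem.List.enumerate, List.foldl_cons, List.foldl_nil, hstep]
      by_cases hgt : s > M
      · have hmax : max M s = s := by omega
        have hJ : pvJ (pvSk 0 t ++ [s]) s = [(((pvSk 0 t).length : Int)) + 1] := by
          rw [pvJ_append_singleton, pvJ_all_lt]
          · simp
          · intro x hx
            exact lt_of_le_of_lt (mem_le_pvMv _ _ hx) hgt
        rw [if_pos hgt, hmax, hJ, pvSk_length]
        simp
      · rw [if_neg hgt]
        by_cases heq : s = M
        · have hmax : max M s = M := by omega
          have hJ : pvJ (pvSk 0 t ++ [s]) M = pvJ (pvSk 0 t) M ++ [((pvSk 0 t).length : Int) + 1] := by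
            rw [pvJ_append_singleton]
            simp [heq]
          rw [if_pos heq, hmax, hJ, pvSk_length]
          simp [heq]
        · have hmax : max M s = M := by omega
          have hJ : pvJ (pvSk 0 t ++ [s]) M = pvJ (pvSk 0 t) M := by
            rw [pvJ_append_singleton]
            have hb : (s == M) = false := by simpa using heq
            simp [hb]
          rw [if_neg heq, hmax, hJ]

-- ===== VERDICT (by name: the statement is the Claim_ definition above) =====
theorem find_max_skews_spec : Claim_equal_find_max_skews := by
  intro genome _
  unfold Spec_find_max_skews find_max_skews find_max_skews_alt
  rw [foldA_eq, foldB_eq]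
  simp only [List.nil_append]
  rw [← pvMv_eq_max?]
  unfold pvJ
  rw [List.map_map]
  rfl
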